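-- pv_equiv track=rewrite | github.com/Coki628/kyopro_submissions | CodeForces/1248d2.py | check
-- ===== SOURCE A (Python) =====
-- def check(S):
--     cur = cnt = mn = 0
--     for s in S:
--         if s == '(':
--             cur += 1
--         else:
--             cur -= 1
--         if cur < mn:
--             mn = cur
--             cnt = 1
--         elif cur == mn:
--             cnt += 1
--     return cnt
-- ===== SOURCE B (Python) =====
-- def check(S):
--     prefixes = []
--     cur = 0
--     for s in S:
--         cur += 1 if s == '(' else -1
--         prefixes.append(cur)
--     mn = min([0] + prefixes)
--     return prefixes.count(mn)
-- ===== Notes on version B (the rewrite author's own statement) =====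
-- stated objective: alternative
-- what changed: Replaces the fused running-min/count tracking (reset-to-1 on a new minimum) with a table-then-two-scans shape: build the prefix-balance list, take min([0]+prefixes) in one scan, then count its occurrences in another.
import Mathlib
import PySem

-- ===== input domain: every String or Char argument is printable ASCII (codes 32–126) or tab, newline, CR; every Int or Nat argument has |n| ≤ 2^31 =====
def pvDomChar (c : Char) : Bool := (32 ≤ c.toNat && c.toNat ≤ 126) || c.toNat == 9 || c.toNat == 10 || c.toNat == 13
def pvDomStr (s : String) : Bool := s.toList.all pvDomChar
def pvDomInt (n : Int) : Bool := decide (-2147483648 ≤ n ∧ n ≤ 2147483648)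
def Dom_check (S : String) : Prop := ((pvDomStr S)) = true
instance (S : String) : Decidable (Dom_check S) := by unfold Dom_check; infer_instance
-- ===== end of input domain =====

-- B replaces A's fused running-min/count state machine with a prefix-balance table, a min scan and a count scan; same O(n) cost.

-- ===== PORT A =====
-- A's loop: state (cur, cnt, mn), branch order as in the Python.
def check (S : String) : Int :=
  let st := S.toList.foldl (fun (st : Int × Int × Int) s =>
    let cur := if s = '(' then st.1 + 1 else st.1 - 1
    if cur < st.2.2 then (cur, 1, cur)
    else if cur = st.2.2 then (cur, st.2.1 + 1, st.2.2)
    else (cur, st.2.1, st.2.2)) (0, 0, 0)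
  st.2.1

-- ===== PORT B =====
-- B's loop: accumulate the prefix-balance list, then min([0]+prefixes), then prefixes.count(mn).
def check_alt (S : String) : Int :=
  let p := S.toList.foldl (fun (st : Int × List Int) s =>
    let cur := st.1 + (if s = '(' then 1 else (-1 : Int))
    (cur, st.2 ++ [cur])) (0, [])
  let mn := p.2.foldl min 0      -- min([0] + prefixes)
  PySem.List.count p.2 mn

-- ===== PRECONDITION & SPEC =====
def Spec_check (S : String) (out : Int) : Prop := out = check_alt S
instance (S : String) (out : Int) : Decidable (Spec_check S out) := by unfold Spec_check; infer_instance

-- ===== CLAIM (what is proved, stated in full; the proofs are below) =====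
def Claim_equal_check : Prop := ∀ (S : String), Dom_check S → Spec_check S (check S)

-- ===== LEMMAS AND PROOFS =====

def prefs (cur : Int) : List Char → List Int
  | [] => []
  | c :: t =>
    let cur' := cur + (if c = '(' then 1 else -1)
    cur' :: prefs cur' t

theorem foldl_min_le (l : List Int) : ∀ a : Int, l.foldl min a ≤ a := by
  induction l with
  | nil => intro a; simp
  | cons x t ih =>
    intro a
    calc (x :: t).foldl min a = t.foldl min (min a x) := by simp
    _ ≤ min a x := ih _
    _ ≤ a := min_le_left _ _

theorem loopA_step (t : List Char)
    (ih : ∀ (cur cnt mn : Int),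
      (t.foldl (fun (st : Int × Int × Int) s =>
        let cur := if s = '(' then st.1 + 1 else st.1 - 1
        if cur < st.2.2 then (cur, 1, cur)
        else if cur = st.2.2 then (cur, st.2.1 + 1, st.2.2)
        else (cur, st.2.1, st.2.2)) (cur, cnt, mn)).2.1 =
      (if (prefs cur t).foldl min mn = mn then cnt else 0)
        + (PySem.List.count (prefs cur t) ((prefs cur t).foldl min mn) : Int))
    (cur' cnt mn : Int) :
    (t.foldl (fun (st : Int × Int × Int) s =>
        let cur := if s = '(' then st.1 + 1 else st.1 - 1
        if cur < st.2.2 then (cur, 1, cur)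
        else if cur = st.2.2 then (cur, st.2.1 + 1, st.2.2)
        else (cur, st.2.1, st.2.2))
      (if cur' < mn then (cur', 1, cur')
       else if cur' = mn then (cur', cnt + 1, mn)
       else (cur', cnt, mn))).2.1 =
    (if (prefs cur' t).foldl min (min mn cur') = mn then cnt else 0)
      + (PySem.List.count (cur' :: prefs cur' t) ((prefs cur' t).foldl min (min mn cur')) : Int) := by
  by_cases h1 : cur' < mn
  · have hmin : min mn cur' = cur' := by omega
    rw [if_pos h1, ih cur' 1 cur', hmin]
    have hle : (prefs cur' t).foldl min cur' ≤ cur' := foldl_min_le _ _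
    have hne : (prefs cur' t).foldl min cur' ≠ mn := by omega
    rw [if_neg hne]
    simp only [PySem.List.count, List.count_cons]
    push_cast
    by_cases h : (prefs cur' t).foldl min cur' = cur' <;> simp [h, beq_iff_eq] <;> omega
  · by_cases h2 : cur' = mn
    · subst h2
      have hmin : min cur' cur' = cur' := min_self cur'
      rw [if_neg h1, if_pos rfl, ih cur' (cnt + 1) cur', hmin]
      by_cases h : (prefs cur' t).foldl min cur' = cur'
      · simp [PySem.List.count, List.count_cons, h]
        push_cast; omega
      · have hle : (prefs cur' t).foldl min cur' ≤ cur' := foldl_min_le _ _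
        have hb : ((prefs cur' t).foldl min cur' == cur') = false := by
          simp [beq_iff_eq]; omega
        have hne : ¬ cur' = (prefs cur' t).foldl min cur' := fun e => h e.symm
        simp [PySem.List.count, List.count_cons, h, hb, hne]
    · have h3 : mn < cur' := by omega
      have hmin : min mn cur' = mn := by omega
      rw [if_neg h1, if_neg h2, ih cur' cnt mn, hmin]
      have hle : (prefs cur' t).foldl min mn ≤ mn := foldl_min_le _ _
      have : ((prefs cur' t).foldl min mn == cur') = false := by
        simp [beq_iff_eq]; omega
      simp only [PySem.List.count, List.count_cons, this]
      push_cast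
      have : ¬ cur' = (prefs cur' t).foldl min mn := by omega
      simp [this]

theorem loopA_cnt (l : List Char) : ∀ (cur cnt mn : Int),
    (l.foldl (fun (st : Int × Int × Int) s =>
      let cur := if s = '(' then st.1 + 1 else st.1 - 1
      if cur < st.2.2 then (cur, 1, cur)
      else if cur = st.2.2 then (cur, st.2.1 + 1, st.2.2)
      else (cur, st.2.1, st.2.2)) (cur, cnt, mn)).2.1 =
    (if (prefs cur l).foldl min mn = mn then cnt else 0)
      + (PySem.List.count (prefs cur l) ((prefs cur l).foldl min mn) : Int) := by
  induction l with
  | nil => intro cur cnt mn; simp [prefs, PySem.List.count]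
  | cons c t ih =>
    intro cur cnt mn
    have hd : (if c = '(' then cur + 1 else cur - 1) = cur + (if c = '(' then 1 else -1) := by
      split <;> ring
    simp only [List.foldl_cons, prefs]
    rw [hd]
    exact loopA_step t ih _ cnt mn

-- invariant for B's list-building loop
theorem loopB_prefs (l : List Char) : ∀ (cur : Int) (acc : List Int),
    (l.foldl (fun (st : Int × List Int) s =>
      let cur := st.1 + (if s = '(' then 1 else (-1 : Int))
      (cur, st.2 ++ [cur])) (cur, acc)).2 = acc ++ prefs cur l := by
  induction l with
  | nil => intro cur acc; simp [prefs]
  | cons c t ih =>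
    intro cur acc
    simp only [List.foldl_cons, prefs]
    rw [ih]
    simp

-- ===== VERDICT (by name: the statement is the Claim_ definition above) =====
theorem check_spec : Claim_equal_check := by
  intro S _
  unfold Spec_check check check_alt
  rw [loopA_cnt S.toList 0 0 0]
  simp only [loopB_prefs]
  simp
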